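-- pv_equiv track=rewrite | github.com/jsheng0901/leetcode | OA/Amazon/get_max_aggregate_temperature_change.py | getMaxAggregateTemperatureChange
-- ===== SOURCE A (Python) =====
-- from typing import List
--
-- def getMaxAggregateTemperatureChange(tempChange: List[int]) -> int:
--     """
--     Time O(n)
--     Space O(n)
--     前缀和思路，同2256
--     """
--     pre_sum = [0] * (len(tempChange) + 1)
--     for i in range(1, len(pre_sum)):
--         pre_sum[i] = pre_sum[i - 1] + tempChange[i - 1]
--
--     max_change = float('-inf')
--     for i in range(len(tempChange)):
--         first = pre_sum[i + 1]
--         second = pre_sum[-1] - pre_sum[i]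
--         max_change = max(max_change, max(first, second))
--
--     return max_change
-- ===== SOURCE B (Python) =====
-- def getMaxAggregateTemperatureChange(tempChange):
--     # Two running-sum passes, no prefix-sum array.
--     s = 0
--     best = None
--     for x in tempChange:
--         s += x
--         if best is None or s > best:
--             best = s
--     t = 0
--     for x in reversed(tempChange):
--         t += x
--         if t > best:
--             best = t
--     return best
-- ===== Notes on version B (the rewrite author's own statement) =====
-- stated objective: simpler
-- what changed: Replaces the prefix-sum array plus per-index max(prefix, total-prefix) scan with two running-sum passes (forward for best prefix sum, backward for best suffix sum) that keep one running maximum and allocate no array (measured constant-factor speedup).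
-- outside the precondition, e.g. on getMaxAggregateTemperatureChange([]): A returns -inf, B returns None
import Mathlib
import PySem

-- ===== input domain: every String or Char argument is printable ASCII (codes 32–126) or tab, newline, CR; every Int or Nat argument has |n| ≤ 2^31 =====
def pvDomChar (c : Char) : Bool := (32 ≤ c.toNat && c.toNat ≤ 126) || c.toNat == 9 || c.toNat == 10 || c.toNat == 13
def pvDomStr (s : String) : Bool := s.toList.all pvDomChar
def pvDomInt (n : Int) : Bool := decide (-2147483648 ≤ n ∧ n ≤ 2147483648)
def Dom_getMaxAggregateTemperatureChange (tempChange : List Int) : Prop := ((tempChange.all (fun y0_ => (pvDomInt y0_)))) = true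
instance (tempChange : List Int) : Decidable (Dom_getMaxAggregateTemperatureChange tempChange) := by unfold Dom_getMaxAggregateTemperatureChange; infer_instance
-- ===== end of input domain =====

-- B replaces A's prefix-sum array and per-index max(prefix, total-prefix) scan by two
-- running-sum passes (forward best prefix sum, backward best suffix sum), allocating no array.

-- ===== PORT A =====
def getMaxAggregateTemperatureChange (tempChange : List Int) : Int :=
  -- pre_sum = [0] * (len(tempChange) + 1); for i in range(1, len(pre_sum)): pre_sum[i] = pre_sum[i-1] + tempChange[i-1]
  let pre_sum : List Int := List.replicate (tempChange.length + 1) 0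
  let pre_sum := (PySem.List.pyRange 1 (pre_sum.length : Int) 1).foldl
    (fun ps i => ps.set i.toNat
      (PySem.List.pyGetD ps (i - 1) 0 + PySem.List.pyGetD tempChange (i - 1) 0)) pre_sum
  -- max_change = float('-inf')  (modelled as Option Int, none = -inf)
  let max_change : Option Int := none
  let max_change := (PySem.List.pyRange 0 (tempChange.length : Int) 1).foldl
    (fun m i =>
      let first := PySem.List.pyGetD pre_sum (i + 1) 0
      let second := PySem.List.pyGetD pre_sum (-1) 0 - PySem.List.pyGetD pre_sum i 0
      some (match m with | none => max first second | some b => max b (max first second))) max_change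
  -- Python returns float('-inf') when the loop never ran (empty input): excluded by Pre_
  max_change.getD 0

-- ===== PORT B =====
def getMaxAggregateTemperatureChange_alt (tempChange : List Int) : Int :=
  let fwd := tempChange.foldl
    (fun (p : Int × Option Int) x =>
      let s := p.1 + x
      (s, match p.2 with
          | none => some s
          | some b => if s > b then some s else some b)) (0, none)
  let bwd := tempChange.reverse.foldl
    (fun (p : Int × Option Int) x =>
      let t := p.1 + x
      (t, match p.2 with
          | none => some t   -- unreachable: best is already set when the list is nonempty
          | some b => if t > b then some t else some b)) (0, fwd.2)
  -- Python returns None when both loops never ran (empty input): excluded by Pre_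
  bwd.2.getD 0

-- ===== PRECONDITION & SPEC =====
-- Pre_ excludes only the empty list, on which A returns float('-inf') — a float, not an int
-- (and B returns None); on all other inputs A returns a plain int.
def Pre_getMaxAggregateTemperatureChange (tempChange : List Int) : Prop := tempChange ≠ []
instance (tempChange : List Int) : Decidable (Pre_getMaxAggregateTemperatureChange tempChange) := by unfold Pre_getMaxAggregateTemperatureChange; infer_instance
def pvWitness_getMaxAggregateTemperatureChange : List Int := [3, -1, 2]

def Spec_getMaxAggregateTemperatureChange (tempChange : List Int) (out : Int) : Prop := out = getMaxAggregateTemperatureChange_alt tempChange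
instance (tempChange : List Int) (out : Int) : Decidable (Spec_getMaxAggregateTemperatureChange tempChange out) := by unfold Spec_getMaxAggregateTemperatureChange; infer_instance

-- ===== CLAIM (what is proved, stated in full; the proofs are below) =====
def Claim_equal_getMaxAggregateTemperatureChange : Prop := ∀ (tempChange : List Int), Dom_getMaxAggregateTemperatureChange tempChange → Pre_getMaxAggregateTemperatureChange tempChange → Spec_getMaxAggregateTemperatureChange tempChange (getMaxAggregateTemperatureChange tempChange)

-- ===== LEMMAS AND PROOFS =====

-- "max with -inf" machinery: Option Int with none = -inf
def omax (o : Option Int) (x : Int) : Option Int :=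
  some (match o with | none => x | some b => max b x)

def mfold (l : List Int) (o : Option Int) : Option Int := l.foldl omax o

def maxO : Option Int → Option Int → Option Int
  | none, o => o
  | some a, none => some a
  | some a, some b => some (max a b)

theorem maxO_comm (o o' : Option Int) : maxO o o' = maxO o' o := by
  cases o <;> cases o' <;> simp [maxO, max_comm]

theorem maxO_assoc (a b c : Option Int) : maxO (maxO a b) c = maxO a (maxO b c) := by
  cases a <;> cases b <;> cases c <;> simp [maxO, max_assoc]

theorem omax_eq_maxO (o : Option Int) (x : Int) : omax o x = maxO o (some x) := by
  cases o <;> rfl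

theorem mfold_cons (x : Int) (l : List Int) (o : Option Int) :
    mfold (x :: l) o = mfold l (omax o x) := rfl

theorem mfold_eq_maxO (l : List Int) (o : Option Int) :
    mfold l o = maxO o (mfold l none) := by
  induction l generalizing o with
  | nil => cases o <;> rfl
  | cons x l ih =>
      rw [mfold_cons, mfold_cons, ih (omax o x), ih (omax none x),
        omax_eq_maxO, omax_eq_maxO, maxO_assoc]
      rfl

theorem mfold_append (l₁ l₂ : List Int) (o : Option Int) :
    mfold (l₁ ++ l₂) o = mfold l₂ (mfold l₁ o) := List.foldl_append

theorem maxO_swap (a b c d : Option Int) :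
    maxO (maxO a b) (maxO c d) = maxO (maxO a c) (maxO b d) := by
  cases a <;> cases b <;> cases c <;> cases d <;> simp [maxO] <;> omega

theorem mfold_reverse (l : List Int) : mfold l.reverse none = mfold l none := by
  induction l with
  | nil => rfl
  | cons x l ih =>
      rw [List.reverse_cons]
      calc mfold (l.reverse ++ [x]) none
          = mfold [x] (mfold l.reverse none) := mfold_append _ _ _
        _ = omax (mfold l none) x := by rw [ih]; rfl
        _ = maxO (mfold l none) (some x) := omax_eq_maxO _ _
        _ = maxO (some x) (mfold l none) := maxO_comm _ _
        _ = maxO (omax none x) (mfold l none) := rfl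
        _ = mfold l (omax none x) := (mfold_eq_maxO _ _).symm
        _ = mfold (x :: l) none := rfl

-- max over a pointwise max of two candidate families = max of the two family maxima
theorem mfold_map_max {α : Type} (l : List α) (f g : α → Int) :
    mfold (l.map (fun i => max (f i) (g i))) none
      = maxO (mfold (l.map f) none) (mfold (l.map g) none) := by
  induction l with
  | nil => rfl
  | cons a l ih =>
      simp only [List.map_cons, mfold_cons]
      rw [mfold_eq_maxO _ (omax none (max (f a) (g a))), ih,
        mfold_eq_maxO (l.map f) (omax none (f a)), mfold_eq_maxO (l.map g) (omax none (g a))]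
      rw [show omax none (max (f a) (g a)) = maxO (omax none (f a)) (omax none (g a)) from rfl]
      exact maxO_swap _ _ _ _

-- prefix-sum abbreviation
def psum (xs : List Int) (k : Nat) : Int := (xs.take k).sum

theorem psum_succ (xs : List Int) (k : Nat) (h : k < xs.length) :
    psum xs (k + 1) = psum xs k + xs[k] := List.sum_take_succ xs k h

-- ===== A-side characterisation =====

def preL (xs : List Int) : List Int :=
  (List.range (xs.length + 1)).map (fun k => psum xs k)

theorem preL_length (xs : List Int) : (preL xs).length = xs.length + 1 := by
  simp [preL]

theorem preL_getElem (xs : List Int) (k : Nat) (h : k < xs.length + 1) :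
    (preL xs)[k]'(by simp [preL_length, h]) = psum xs k := by
  simp [preL]

-- the array-building loop produces exactly the prefix sums
theorem buildA (xs : List Int) (m : Nat) (hm : m ≤ xs.length) :
    (PySem.List.pyRange 1 ((m : Int) + 1) 1).foldl
      (fun ps i => ps.set i.toNat
        (PySem.List.pyGetD ps (i - 1) 0 + PySem.List.pyGetD xs (i - 1) 0))
      (List.replicate (xs.length + 1) 0)
    = (List.range (xs.length + 1)).map (fun k => if k ≤ m then psum xs k else 0) := by
  induction m with
  | zero =>
      rw [PySem.List.pyRange_one_eq_nil (by omega)]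
      simp only [List.foldl_nil]
      apply List.ext_getElem (by simp)
      intro i h1 h2
      simp only [List.getElem_replicate, List.getElem_map, List.getElem_range]
      split
      · next h =>
          have hi : i = 0 := by omega
          subst hi; simp [psum]
      · rfl
  | succ m ih =>
      have hm' : m ≤ xs.length := by omega
      have hc2 : ((m + 1 : Nat) : Int) + 1 = ((m : Int) + 1) + 1 := by push_cast; ring
      rw [hc2, PySem.List.pyRange_one_succ_right (by omega), List.foldl_append, ih hm']
      simp only [List.foldl_cons, List.foldl_nil]
      have hget1 : PySem.List.pyGetD
          ((List.range (xs.length + 1)).map (fun k => if k ≤ m then psum xs k else 0))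
          ((m : Int) + 1 - 1) 0 = psum xs m := by
        have : ((m : Int) + 1 - 1) = ((m : Nat) : Int) := by ring
        rw [this, PySem.List.pyGetD_natCast]
        rw [List.getD_eq_getElem?_getD, List.getElem?_map, List.getElem?_range (by omega)]
        simp
      have hget2 : PySem.List.pyGetD xs ((m : Int) + 1 - 1) 0 = xs[m]'(by omega) := by
        have : ((m : Int) + 1 - 1) = ((m : Nat) : Int) := by ring
        rw [this, PySem.List.pyGetD_natCast, List.getD_eq_getElem?_getD,
          List.getElem?_eq_getElem (by omega)]
        rfl
      rw [hget1, hget2]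
      have htn : ((m : Int) + 1).toNat = m + 1 := by omega
      rw [htn]
      apply List.ext_getElem (by simp)
      intro i h1 h2
      rw [List.getElem_set]
      simp only [List.getElem_map, List.getElem_range]
      by_cases hi : m + 1 = i
      · subst hi
        rw [if_pos rfl, if_pos (by omega), ← psum_succ xs m (by omega)]
      · rw [if_neg hi]
        by_cases h3 : i ≤ m
        · rw [if_pos h3, if_pos (by omega)]
        · rw [if_neg h3, if_neg (by omega)]

theorem buildA_full (xs : List Int) :
    (PySem.List.pyRange 1 ((xs.length : Int) + 1) 1).foldl
      (fun ps i => ps.set i.toNat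
        (PySem.List.pyGetD ps (i - 1) 0 + PySem.List.pyGetD xs (i - 1) 0))
      (List.replicate (xs.length + 1) 0) = preL xs := by
  rw [buildA xs xs.length le_rfl]
  apply List.map_congr_left
  intro k hk
  rw [List.mem_range] at hk
  rw [if_pos (by omega)]

-- candidate values of A's second loop
def candsA (xs : List Int) : List Int :=
  (List.range xs.length).map
    (fun i => max (psum xs (i + 1)) (psum xs xs.length - psum xs i))

theorem preL_getD (xs : List Int) (k : Nat) (h : k < xs.length + 1) :
    (preL xs).getD k 0 = psum xs k := by
  rw [List.getD_eq_getElem?_getD, List.getElem?_eq_getElem (by simp [preL_length]; omega),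
    preL_getElem xs k h]
  rfl

theorem preL_last (xs : List Int) :
    PySem.List.pyGetD (preL xs) (-1) 0 = psum xs xs.length := by
  rw [PySem.List.pyGetD_neg_ofNat (preL xs) 1 0 (by omega) (by simp [preL_length])]
  simp only [preL_length, Nat.add_sub_cancel]
  exact preL_getElem xs xs.length (by omega)

theorem loopA (xs : List Int) :
    (PySem.List.pyRange 0 (xs.length : Int) 1).foldl
      (fun m i =>
        let first := PySem.List.pyGetD (preL xs) (i + 1) 0
        let second := PySem.List.pyGetD (preL xs) (-1) 0 - PySem.List.pyGetD (preL xs) i 0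
        some (match m with | none => max first second | some b => max b (max first second)))
      none
    = mfold (candsA xs) none := by
  rw [PySem.List.pyRange_one 0 (xs.length : Int)]
  have hlen : ((xs.length : Int) - 0).toNat = xs.length := by omega
  rw [hlen, List.foldl_map]
  unfold candsA mfold
  rw [List.foldl_map]
  refine PySem.List.foldl_congr_mem _ _ _ _ ?_
  intro o k hk
  rw [List.mem_range] at hk
  have h1 : PySem.List.pyGetD (preL xs) (0 + (k : Int) + 1) 0 = psum xs (k + 1) := by
    have : (0 + (k : Int) + 1) = (((k + 1 : Nat)) : Int) := by push_cast; ring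
    rw [this, PySem.List.pyGetD_natCast, preL_getD xs (k + 1) (by omega)]
  have h2 : PySem.List.pyGetD (preL xs) (0 + (k : Int)) 0 = psum xs k := by
    have : (0 + (k : Int)) = ((k : Nat) : Int) := by ring
    rw [this, PySem.List.pyGetD_natCast, preL_getD xs k (by omega)]
  simp only [h1, h2, preL_last, omax]

-- A's port equals the max over the candidate family
theorem A_eq (xs : List Int) :
    getMaxAggregateTemperatureChange xs = (mfold (candsA xs) none).getD 0 := by
  unfold getMaxAggregateTemperatureChange
  simp only [List.length_replicate]
  have hc : ((xs.length + 1 : Nat) : Int) = (xs.length : Int) + 1 := by push_cast; ring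
  rw [hc, buildA_full, loopA]

-- ===== B-side characterisation =====

def prelB (xs : List Int) : List Int :=
  (List.range xs.length).map (fun k => psum xs (k + 1))

-- the running-sum pass computes (total sum, max over nonempty prefix sums)
theorem fwd_char (xs : List Int) (s0 : Int) (o0 : Option Int) :
    xs.foldl
      (fun (p : Int × Option Int) x =>
        let s := p.1 + x
        (s, match p.2 with
            | none => some s
            | some b => if s > b then some s else some b)) (s0, o0)
    = (s0 + xs.sum,
       mfold ((List.range xs.length).map (fun k => s0 + psum xs (k + 1))) o0) := by
  induction xs generalizing s0 o0 with
  | nil => simp [mfold]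
  | cons x xs ih =>
      rw [List.foldl_cons, ih]
      have hstep : (match o0 with
          | none => some (s0 + x)
          | some b => if s0 + x > b then some (s0 + x) else some b) = omax o0 (s0 + x) := by
        cases o0 with
        | none => rfl
        | some b =>
            simp only [omax]
            by_cases h : s0 + x > b
            · rw [if_pos h, max_eq_right (le_of_lt h)]
            · rw [if_neg h, max_eq_left (by omega)]
      simp only [hstep, Prod.mk.injEq]
      constructor
      · rw [List.sum_cons]; ring
      · simp only [List.length_cons, List.range_succ_eq_map, List.map_cons, mfold_cons,
          List.map_map]
        congr 1
        · apply List.map_congr_left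
          intro k _
          simp only [Function.comp_apply, psum, List.take_succ_cons, List.sum_cons]
          ring
        · simp [psum, omax]

theorem B_eq (xs : List Int) :
    getMaxAggregateTemperatureChange_alt xs
      = (maxO (mfold (prelB xs) none)
          (mfold ((List.range xs.length).map
            (fun k => (xs.reverse.take (k + 1)).sum)) none)).getD 0 := by
  unfold getMaxAggregateTemperatureChange_alt
  simp only [fwd_char]
  have h1 : (List.range xs.length).map (fun k => 0 + psum xs (k + 1)) = prelB xs := by
    unfold prelB; apply List.map_congr_left; intro k _; ring
  have h2 : (List.range xs.reverse.length).map (fun k => 0 + psum xs.reverse (k + 1))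
      = (List.range xs.length).map (fun k => (xs.reverse.take (k + 1)).sum) := by
    rw [List.length_reverse]
    apply List.map_congr_left; intro k _; simp [psum]
  rw [h1, h2, mfold_eq_maxO]

-- the backward pass's candidates are A's "second" candidates, reversed
theorem suf_rev (xs : List Int) :
    ((List.range xs.length).map (fun k => (xs.reverse.take (k + 1)).sum)).reverse
      = (List.range xs.length).map (fun i => psum xs xs.length - psum xs i) := by
  apply List.ext_getElem (by simp)
  intro i h1 h2
  simp only [List.length_reverse, List.length_map, List.length_range] at h1 h2
  rw [List.getElem_reverse]
  simp only [List.getElem_map, List.getElem_range, List.length_map, List.length_range]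
  have htake : xs.length - 1 - i + 1 = xs.length - i := by omega
  rw [htake]
  have hdrop : xs.reverse.take (xs.length - i) = (xs.drop i).reverse := by
    rw [List.take_reverse]
    congr 1
    congr 1
    omega
  rw [hdrop, List.sum_reverse]
  have hsplit : psum xs i + (xs.drop i).sum = xs.sum := by
    rw [psum, ← List.sum_append, List.take_append_drop]
  have hfull : psum xs xs.length = xs.sum := by simp [psum]
  omega

-- ===== VERDICT (by name: the statement is the Claim_ definition above) =====
theorem getMaxAggregateTemperatureChange_spec : Claim_equal_getMaxAggregateTemperatureChange := by
  intro xs _ _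
  unfold Spec_getMaxAggregateTemperatureChange
  rw [A_eq, B_eq]
  have hcands : candsA xs
      = (List.range xs.length).map
          (fun i => max (psum xs (i + 1)) (psum xs xs.length - psum xs i)) := rfl
  rw [hcands, mfold_map_max]
  rw [show (List.range xs.length).map (fun i => psum xs (i + 1)) = prelB xs from rfl]
  rw [← suf_rev, mfold_reverse]
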